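-- pv_equiv track=rewrite | github.com/VaibhavMishra173/JobSwitch | 05_Arrar/sec_lar_arr.py | sndlar
-- ===== SOURCE A (Python) =====
-- def find(a):
--     res = 0
--     for i in range(1,len(a)-1):
--         if(a[i]>a[res]):
--             res=i
--
--     return res
--
-- def sndlar(a):
--     lar = find(a)
--     res = -1
--     for i in range(0,len(a)-1):
--         if (a[i]!=a[lar]):
--             if(res==-1):
--                 res=i
--             elif(a[i]>a[res]):
--                 res=i
--
--     return res
-- ===== SOURCE B (Python) =====
-- def sndlar(a):
--     idx_max = 0
--     idx_sec = -1
--     for i in range(1, len(a) - 1):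
--         if a[i] > a[idx_max]:
--             idx_sec = idx_max
--             idx_max = i
--         elif a[i] < a[idx_max] and (idx_sec == -1 or a[i] > a[idx_sec]):
--             idx_sec = i
--     return idx_sec
-- ===== Notes on version B (the rewrite author's own statement) =====
-- stated objective: alternative
-- what changed: Replaced A's two-phase scheme (find the max index over a[0..n-2], then rescan a[0..n-2] for the best index with a different value) by a single pass that simultaneously maintains the current max index and the current second-best index, demoting the old max index to second place whenever a new max appears.
import Mathlib
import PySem

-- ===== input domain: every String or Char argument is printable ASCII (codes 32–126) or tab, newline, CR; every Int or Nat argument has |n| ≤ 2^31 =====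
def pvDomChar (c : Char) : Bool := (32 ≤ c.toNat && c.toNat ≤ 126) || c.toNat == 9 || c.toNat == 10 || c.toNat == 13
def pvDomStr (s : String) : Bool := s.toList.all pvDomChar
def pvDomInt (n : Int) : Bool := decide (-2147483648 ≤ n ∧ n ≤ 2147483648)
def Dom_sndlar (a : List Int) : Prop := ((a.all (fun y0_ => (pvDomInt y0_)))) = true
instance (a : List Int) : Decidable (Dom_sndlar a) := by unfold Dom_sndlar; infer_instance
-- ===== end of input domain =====

-- B merges A's two scans (find max index, rescan for the runner-up) into one pass
-- maintaining both indices; same O(n) cost, structurally different decomposition.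

-- ===== PORT A =====
def sndlar (a : List Int) : Int :=
  let lar : Int := (PySem.List.pyRange 1 ((a.length : Int) - 1) 1).foldl
    (fun res i =>
      if PySem.List.pyGetD a i 0 > PySem.List.pyGetD a res 0 then i else res) 0
  (PySem.List.pyRange 0 ((a.length : Int) - 1) 1).foldl
    (fun res i =>
      if PySem.List.pyGetD a i 0 ≠ PySem.List.pyGetD a lar 0 then
        (if res = -1 then i
         else if PySem.List.pyGetD a i 0 > PySem.List.pyGetD a res 0 then i else res)
      else res) (-1)

-- ===== PORT B =====
def sndlar_alt (a : List Int) : Int :=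
  ((PySem.List.pyRange 1 ((a.length : Int) - 1) 1).foldl
    (fun (st : Int × Int) i =>
      if PySem.List.pyGetD a i 0 > PySem.List.pyGetD a st.1 0 then (i, st.1)
      else if PySem.List.pyGetD a i 0 < PySem.List.pyGetD a st.1 0 ∧
              (st.2 = -1 ∨ PySem.List.pyGetD a i 0 > PySem.List.pyGetD a st.2 0) then (st.1, i)
      else st) (0, -1)).2

-- ===== PRECONDITION & SPEC =====
def Spec_sndlar (a : List Int) (out : Int) : Prop := out = sndlar_alt a
instance (a : List Int) (out : Int) : Decidable (Spec_sndlar a out) := by unfold Spec_sndlar; infer_instance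

-- ===== CLAIM (what is proved, stated in full; the proofs are below) =====
def Claim_equal_sndlar : Prop := ∀ (a : List Int), Dom_sndlar a → Spec_sndlar a (sndlar a)

-- ===== LEMMAS AND PROOFS =====

def gv (a : List Int) (i : Int) : Int := PySem.List.pyGetD a i 0

def findF (a : List Int) (u : Int) : Int :=
  (PySem.List.pyRange 1 u 1).foldl
    (fun res i => if gv a i > gv a res then i else res) 0

def secF (a : List Int) (M : Int) (u : Int) : Int :=
  (PySem.List.pyRange 0 u 1).foldl
    (fun res i =>
      if gv a i ≠ M then
        (if res = -1 then i else if gv a i > gv a res then i else res)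
      else res) (-1)

def bF (a : List Int) (u : Int) : Int × Int :=
  (PySem.List.pyRange 1 u 1).foldl
    (fun (st : Int × Int) i =>
      if gv a i > gv a st.1 then (i, st.1)
      else if gv a i < gv a st.1 ∧ (st.2 = -1 ∨ gv a i > gv a st.2) then (st.1, i)
      else st) (0, -1)

-- m is the FIRST index of the maximum of gv a over [0, k)
def MaxAt (a : List Int) (k m : Int) : Prop :=
  0 ≤ m ∧ m < k ∧ (∀ j, 0 ≤ j → j < k → gv a j ≤ gv a m) ∧
  (∀ j, 0 ≤ j → j < m → gv a j < gv a m)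

-- s is -1 if every value on [0,k) equals M, else the first index of the max among values ≠ M
def SecAt (a : List Int) (M k s : Int) : Prop :=
  (s = -1 ∧ ∀ j, 0 ≤ j → j < k → gv a j = M) ∨
  (0 ≤ s ∧ s < k ∧ gv a s ≠ M ∧
   (∀ j, 0 ≤ j → j < k → gv a j ≠ M → gv a j ≤ gv a s) ∧
   (∀ j, 0 ≤ j → j < s → gv a j ≠ M → gv a j < gv a s))

theorem sndlar_eq (a : List Int) :
    sndlar a = secF a (gv a (findF a ((a.length : Int) - 1))) ((a.length : Int) - 1) := rfl

theorem sndlar_alt_eq (a : List Int) :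
    sndlar_alt a = (bF a ((a.length : Int) - 1)).2 := rfl

theorem findF_spec (a : List Int) : ∀ u : Int, 1 ≤ u → MaxAt a u (findF a u) := by
  intro u hu
  induction u, hu using Int.le_induction with
  | base =>
    rw [findF, PySem.List.pyRange_one_eq_nil (le_refl 1)]
    simp only [List.foldl_nil]
    refine ⟨le_refl 0, by omega, ?_, by omega⟩
    intro j h1 h2
    have : j = 0 := by omega
    subst this; exact le_rfl
  | succ u hu ih =>
    rw [findF, PySem.List.pyRange_one_succ_right hu, List.foldl_append]
    obtain ⟨h0, hlt, hmax, hfst⟩ := ih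
    show MaxAt a (u + 1)
      (if gv a u > gv a (findF a u) then u else findF a u)
    split_ifs with h
    · refine ⟨by omega, by omega, ?_, ?_⟩
      · intro j h1 h2
        rcases lt_or_eq_of_le (by omega : j ≤ u) with hj | hj
        · exact le_of_lt (lt_of_le_of_lt (hmax j h1 hj) h)
        · subst hj; exact le_rfl
      · intro j h1 h2
        exact lt_of_le_of_lt (hmax j h1 h2) h
    · refine ⟨h0, by omega, ?_, hfst⟩
      intro j h1 h2
      rcases lt_or_eq_of_le (by omega : j ≤ u) with hj | hj
      · exact hmax j h1 hj
      · subst hj; omega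

theorem secF_spec (a : List Int) (M : Int) : ∀ u : Int, 0 ≤ u → SecAt a M u (secF a M u) := by
  intro u hu
  induction u, hu using Int.le_induction with
  | base =>
    rw [secF, PySem.List.pyRange_one_eq_nil (le_refl 0)]
    exact Or.inl ⟨rfl, by omega⟩
  | succ u hu ih =>
    rw [secF, PySem.List.pyRange_one_succ_right hu, List.foldl_append]
    show SecAt a M (u + 1)
      (if gv a u ≠ M then
        (if secF a M u = -1 then u
         else if gv a u > gv a (secF a M u) then u else secF a M u)
       else secF a M u)
    split_ifs with h1 h2 h3
    · -- g u ≠ M, previous was -1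
      rcases ih with ⟨_, hall⟩ | ⟨hs0, _, _, _, _⟩
      · refine Or.inr ⟨hu, by omega, h1, ?_, ?_⟩
        · intro j hj1 hj2 hj3
          rcases lt_or_eq_of_le (by omega : j ≤ u) with hj | hj
          · exact absurd (hall j hj1 hj) hj3
          · subst hj; exact le_rfl
        · intro j hj1 hj2 hj3
          exact absurd (hall j hj1 (by omega)) hj3
      · omega
    · -- g u ≠ M, new max among non-M
      rcases ih with ⟨hneg, _⟩ | ⟨hs0, hsk, hsne, hmax, hfst⟩
      · exact absurd hneg h2
      · refine Or.inr ⟨hu, by omega, h1, ?_, ?_⟩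
        · intro j hj1 hj2 hj3
          rcases lt_or_eq_of_le (by omega : j ≤ u) with hj | hj
          · exact le_of_lt (lt_of_le_of_lt (hmax j hj1 hj hj3) h3)
          · subst hj; exact le_rfl
        · intro j hj1 hj2 hj3
          exact lt_of_le_of_lt (hmax j hj1 (by omega) hj3) h3
    · -- g u ≠ M, not bigger: keep
      rcases ih with ⟨hneg, _⟩ | ⟨hs0, hsk, hsne, hmax, hfst⟩
      · exact absurd hneg h2
      · refine Or.inr ⟨hs0, by omega, hsne, ?_, hfst⟩
        intro j hj1 hj2 hj3
        rcases lt_or_eq_of_le (by omega : j ≤ u) with hj | hj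
        · exact hmax j hj1 hj hj3
        · subst hj; omega
    · -- g u = M: keep
      push Not at h1
      rcases ih with ⟨hneg, hall⟩ | ⟨hs0, hsk, hsne, hmax, hfst⟩
      · refine Or.inl ⟨hneg, ?_⟩
        intro j hj1 hj2
        rcases lt_or_eq_of_le (by omega : j ≤ u) with hj | hj
        · exact hall j hj1 hj
        · subst hj; exact h1
      · refine Or.inr ⟨hs0, by omega, hsne, ?_, hfst⟩
        intro j hj1 hj2 hj3
        rcases lt_or_eq_of_le (by omega : j ≤ u) with hj | hj
        · exact hmax j hj1 hj hj3
        · subst hj; exact absurd h1 hj3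

theorem bF_spec (a : List Int) : ∀ u : Int, 1 ≤ u →
    MaxAt a u (bF a u).1 ∧ SecAt a (gv a (bF a u).1) u (bF a u).2 := by
  intro u hu
  induction u, hu using Int.le_induction with
  | base =>
    rw [bF, PySem.List.pyRange_one_eq_nil (le_refl 1)]
    simp only [List.foldl_nil]
    constructor
    · refine ⟨le_refl 0, by omega, ?_, by omega⟩
      intro j h1 h2
      have : j = 0 := by omega
      subst this; exact le_rfl
    · refine Or.inl ⟨rfl, ?_⟩
      intro j h1 h2
      have : j = 0 := by omega
      subst this; rfl
  | succ u hu ih =>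
    rw [bF, PySem.List.pyRange_one_succ_right hu, List.foldl_append]
    obtain ⟨⟨hm0, hmk, hmax, hmfst⟩, hsec⟩ := ih
    show MaxAt a (u + 1)
        (if gv a u > gv a (bF a u).1 then (u, (bF a u).1)
         else if gv a u < gv a (bF a u).1 ∧
                ((bF a u).2 = -1 ∨ gv a u > gv a (bF a u).2) then ((bF a u).1, u)
         else bF a u).1 ∧
      SecAt a (gv a
        (if gv a u > gv a (bF a u).1 then (u, (bF a u).1)
         else if gv a u < gv a (bF a u).1 ∧
                ((bF a u).2 = -1 ∨ gv a u > gv a (bF a u).2) then ((bF a u).1, u)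
         else bF a u).1) (u + 1)
        (if gv a u > gv a (bF a u).1 then (u, (bF a u).1)
         else if gv a u < gv a (bF a u).1 ∧
                ((bF a u).2 = -1 ∨ gv a u > gv a (bF a u).2) then ((bF a u).1, u)
         else bF a u).2
    split_ifs with h1 h2 <;> (try dsimp only)
    · -- new maximum at u; old max index becomes the second
      constructor
      · refine ⟨by omega, by omega, ?_, ?_⟩
        · intro j hj1 hj2
          rcases lt_or_eq_of_le (by omega : j ≤ u) with hj | hj
          · exact le_of_lt (lt_of_le_of_lt (hmax j hj1 hj) h1)
          · subst hj; exact le_rfl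
        · intro j hj1 hj2
          exact lt_of_le_of_lt (hmax j hj1 hj2) h1
      · refine Or.inr ⟨hm0, by omega, by omega, ?_, ?_⟩
        · intro j hj1 hj2 hj3
          rcases lt_or_eq_of_le (by omega : j ≤ u) with hj | hj
          · exact hmax j hj1 hj
          · subst hj; omega
        · intro j hj1 hj2 hj3
          exact hmfst j hj1 hj2
    · -- strictly smaller than the max and better than the current second
      obtain ⟨hlt, hor⟩ := h2
      constructor
      · refine ⟨hm0, by omega, ?_, hmfst⟩
        intro j hj1 hj2
        rcases lt_or_eq_of_le (by omega : j ≤ u) with hj | hj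
        · exact hmax j hj1 hj
        · subst hj; omega
      · refine Or.inr ⟨by omega, by omega, by omega, ?_, ?_⟩
        · intro j hj1 hj2 hj3
          rcases lt_or_eq_of_le (by omega : j ≤ u) with hj | hj
          · rcases hsec with ⟨_, hall⟩ | ⟨hs0, hsk, hsne, hsmax, hsfst⟩
            · exact absurd (hall j hj1 hj) hj3
            · rcases hor with hneg | hgt
              · omega
              · exact le_of_lt (lt_of_le_of_lt (hsmax j hj1 hj hj3) hgt)
          · subst hj; exact le_rfl
        · intro j hj1 hj2 hj3
          rcases hsec with ⟨_, hall⟩ | ⟨hs0, hsk, hsne, hsmax, hsfst⟩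
          · exact absurd (hall j hj1 (by omega)) hj3
          · rcases hor with hneg | hgt
            · omega
            · exact lt_of_le_of_lt (hsmax j hj1 (by omega) hj3) hgt
    · -- no change: g u = max value, or g u not better than the second
      push Not at h1
      constructor
      · refine ⟨hm0, by omega, ?_, hmfst⟩
        intro j hj1 hj2
        rcases lt_or_eq_of_le (by omega : j ≤ u) with hj | hj
        · exact hmax j hj1 hj
        · subst hj; exact h1
      · rcases hsec with ⟨hneg, hall⟩ | ⟨hs0, hsk, hsne, hsmax, hsfst⟩
        · refine Or.inl ⟨hneg, ?_⟩
          intro j hj1 hj2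
          rcases lt_or_eq_of_le (by omega : j ≤ u) with hj | hj
          · exact hall j hj1 hj
          · subst hj
            rcases lt_or_eq_of_le h1 with hc | hc
            · exact absurd ⟨hc, Or.inl hneg⟩ h2
            · exact hc
        · refine Or.inr ⟨hs0, by omega, hsne, ?_, hsfst⟩
          intro j hj1 hj2 hj3
          rcases lt_or_eq_of_le (by omega : j ≤ u) with hj | hj
          · exact hsmax j hj1 hj hj3
          · subst hj
            rcases lt_or_eq_of_le h1 with hc | hc
            · rcases Decidable.em ((bF a j).2 = -1) with he | he
              · omega
              · rcases le_or_gt (gv a j) (gv a (bF a j).2) with hd | hd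
                · exact hd
                · exact absurd ⟨hc, Or.inr hd⟩ h2
            · exact absurd hc hj3

theorem uniq_max (a : List Int) (k m1 m2 : Int)
    (h1 : MaxAt a k m1) (h2 : MaxAt a k m2) : m1 = m2 := by
  obtain ⟨a0, ak, amax, afst⟩ := h1
  obtain ⟨b0, bk, bmax, bfst⟩ := h2
  rcases lt_trichotomy m1 m2 with h | h | h
  · have h3 := bfst m1 a0 h
    have h4 := amax m2 b0 bk
    omega
  · exact h
  · have h3 := afst m2 b0 h
    have h4 := bmax m1 a0 ak
    omega

theorem uniq_sec (a : List Int) (M k s1 s2 : Int)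
    (h1 : SecAt a M k s1) (h2 : SecAt a M k s2) : s1 = s2 := by
  rcases h1 with ⟨e1, all1⟩ | ⟨a0, ak, ane, amax, afst⟩
  · rcases h2 with ⟨e2, _⟩ | ⟨b0, bk, bne, _, _⟩
    · omega
    · exact absurd (all1 s2 b0 bk) bne
  · rcases h2 with ⟨e2, all2⟩ | ⟨b0, bk, bne, bmax, bfst⟩
    · exact absurd (all2 s1 a0 ak) ane
    · rcases lt_trichotomy s1 s2 with h | h | h
      · have h3 := bfst s1 a0 h ane
        have h4 := amax s2 b0 bk bne
        omega
      · exact h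
      · have h3 := afst s2 b0 h bne
        have h4 := bmax s1 a0 ak ane
        omega

-- ===== VERDICT (by name: the statement is the Claim_ definition above) =====
theorem sndlar_spec : Claim_equal_sndlar := by
  intro a _
  show sndlar a = sndlar_alt a
  rw [sndlar_eq, sndlar_alt_eq]
  set u : Int := (a.length : Int) - 1 with hu
  by_cases h : u ≤ 0
  · -- both loops run over an empty range (A's second loop and B's loop)
    rw [secF, PySem.List.pyRange_one_eq_nil h,
        bF, PySem.List.pyRange_one_eq_nil (by omega : u ≤ 1)]
    rfl
  · have h1 : 1 ≤ u := by omega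
    have hfind := findF_spec a u h1
    have hsecA := secF_spec a (gv a (findF a u)) u (by omega)
    have hB := bF_spec a u h1
    have hm : findF a u = (bF a u).1 := uniq_max a u _ _ hfind hB.1
    have hB2 := hB.2
    rw [← hm] at hB2
    exact uniq_sec a (gv a (findF a u)) u _ _ hsecA hB2
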